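-- pv_equiv track=rewrite | github.com/MiguelLopezCampos/IntroduccionProgramacionCienciaDatos | Python/Ejercicios2/ejercicio9.py | suma_acumulada
-- ===== SOURCE A (Python) =====
-- def suma_acumulada(numeros):
--     lista = []
--     for i in range(len(numeros)):
--         sum_acum = 0
--         for j in range(0,i+1):
--             sum_acum+=numeros[j]
--
--         lista.append(sum_acum)
--
--     return lista
-- ===== SOURCE B (Python) =====
-- def suma_acumulada(numeros):
--     lista = []
--     total = 0
--     for x in numeros:
--         total += x
--         lista.append(total)
--     return lista
-- ===== Notes on version B (the rewrite author's own statement) =====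
-- stated objective: faster
-- what changed: Replaces the quadratic recompute-prefix-sum-from-scratch inner loop with a single pass keeping a running total.
import Mathlib
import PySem

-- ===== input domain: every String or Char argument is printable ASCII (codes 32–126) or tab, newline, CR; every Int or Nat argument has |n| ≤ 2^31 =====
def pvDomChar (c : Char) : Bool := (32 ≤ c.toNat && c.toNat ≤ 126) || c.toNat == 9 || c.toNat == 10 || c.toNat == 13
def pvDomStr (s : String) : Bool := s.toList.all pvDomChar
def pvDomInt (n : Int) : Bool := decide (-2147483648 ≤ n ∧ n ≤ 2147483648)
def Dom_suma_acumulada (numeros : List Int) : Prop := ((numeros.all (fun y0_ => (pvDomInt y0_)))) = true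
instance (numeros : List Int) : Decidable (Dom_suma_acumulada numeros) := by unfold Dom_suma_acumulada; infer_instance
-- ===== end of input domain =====

-- B replaces A's quadratic from-scratch inner summation with a single pass keeping a running total.

-- ===== PORT A =====
-- for i in range(len(numeros)): recompute sum of numeros[0..i] from 0, append.
-- numeros[j] with 0 ≤ j < len is total here, ported as getD (always in range).
def suma_acumulada (numeros : List Int) : List Int :=
  (List.range numeros.length).foldl
    (fun lista i =>
      lista ++ [(List.range (i + 1)).foldl (fun sum_acum j => sum_acum + numeros.getD j 0) 0])
    []

-- ===== PORT B =====
-- single pass with a running total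
def suma_acumulada_alt (numeros : List Int) : List Int :=
  (numeros.foldl (fun (st : Int × List Int) x => (st.1 + x, st.2 ++ [st.1 + x])) (0, [])).2

-- ===== PRECONDITION & SPEC =====
def Spec_suma_acumulada (numeros : List Int) (out : List Int) : Prop := out = suma_acumulada_alt numeros
instance (numeros : List Int) (out : List Int) : Decidable (Spec_suma_acumulada numeros out) := by unfold Spec_suma_acumulada; infer_instance

-- ===== CLAIM (what is proved, stated in full; the proofs are below) =====
def Claim_equal_suma_acumulada : Prop := ∀ (numeros : List Int), Dom_suma_acumulada numeros → Spec_suma_acumulada numeros (suma_acumulada numeros)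

-- ===== LEMMAS AND PROOFS =====

-- A's outer loop is a map over the index range
theorem pv_foldl_append_map {α β : Type} (f : α → β) :
    ∀ (l : List α) (acc : List β),
      l.foldl (fun lista i => lista ++ [f i]) acc = acc ++ l.map f := by
  intro l
  induction l with
  | nil => simp
  | cons x xs ih => intro acc; simp [List.foldl, ih]

-- A's inner loop sums the first k elements
theorem pv_inner_sum (numeros : List Int) :
    ∀ (k : ℕ) (s : Int),
      (List.range k).foldl (fun sum_acum j => sum_acum + numeros.getD j 0) s
        = s + ((numeros.take k).sum) := by
  intro k
  induction k with
  | zero => intro s; simp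
  | succ n ih =>
    intro s
    rw [List.range_succ, List.foldl_append]
    simp only [List.foldl_cons, List.foldl_nil, ih]
    have ht : (List.take (n + 1) numeros).sum = (List.take n numeros).sum + numeros.getD n 0 := by
      by_cases h : n < numeros.length
      · rw [List.getD_eq_getElem _ _ h]
        exact List.sum_take_succ _ _ h
      · rw [List.take_of_length_le (by omega), List.take_of_length_le (by omega),
            List.getD_eq_default _ _ (by omega)]
        simp
    rw [ht]
    ring

-- B's fold produces the running prefix sums
theorem pv_alt_go :
    ∀ (xs : List Int) (t : Int) (acc : List Int),
      (xs.foldl (fun (st : Int × List Int) x => (st.1 + x, st.2 ++ [st.1 + x])) (t, acc)).2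
        = acc ++ (List.range xs.length).map (fun i => t + (xs.take (i + 1)).sum) := by
  intro xs
  induction xs with
  | nil => simp
  | cons x xs ih =>
    intro t acc
    simp only [List.foldl_cons]
    rw [ih]
    simp only [List.length_cons, List.range_succ_eq_map, List.map_cons, List.map_map,
      List.take_succ_cons, List.take_zero, List.sum_cons, List.sum_nil, add_zero,
      List.append_assoc, List.singleton_append]
    congr 2
    apply List.map_congr_left
    intro i _
    simp [add_assoc]

-- ===== VERDICT (by name: the statement is the Claim_ definition above) =====
theorem suma_acumulada_spec : Claim_equal_suma_acumulada := by
  intro numeros _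
  unfold Spec_suma_acumulada suma_acumulada suma_acumulada_alt
  rw [pv_foldl_append_map, pv_alt_go]
  simp only [List.nil_append]
  apply List.map_congr_left
  intro i _
  rw [pv_inner_sum]
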